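-- pv_equiv track=rewrite | github.com/adrianharet/voting | helpers.py | SMG
-- ===== SOURCE A (Python) =====
-- import itertools
--
-- def alternatives(X):
--     """
--         Returns a list of alternatives given iterable X
--         containing the relevant information.
--
--         [2, 3, 1, 4] --> [1, 2, 3, 4]
--         {(1, 2), (3, 4)} --> [1, 2, 3, 4]
--         [[2, 1, 3, 4], [4, 2, 1, 3]] --> [1, 2, 3, 4]
--     """
--
--     if isinstance(X[0], int):
--         return sorted(X)
--     else:
--         return sorted(list(set(c for e in X for c in e)))
--
-- def support(Profile, x, y):
--     """
--         Returns the number of voters in Profile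
--         where x is preferred to y.
--
--         [[1,2,3], [1,2,3], [2,1,3]], 1, 2 --> 2
--     """
--
--     return len([l for l in Profile if l.index(x) - l.index(y) < 0])
--
-- def margin(Profile, x, y):
--     """
--         Returns the margin of victory for alternative x over alternative y
--         with respect to the given profile Profile.
--
--         Can be negative.
--
--         [[1,2,3], [1,3,2]], 1, 2 --> 2-0 = 2
--         [[1,2,3], [1,3,2]], 2, 1 --> 0-2 = -2
--     """
--     return support(Profile, x, y) - support(Profile, y, x)
--
-- def SMG(Graph_Thingy):
--     """
--         Returns the SMG (simple majority graph) of Graph_Thingy as a list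
--         of tuples. Each tuple (x, y) is an edge in the graph,
--         indicating that there is a strict preference for x over y
--         with respect to Graph_Thingy.
--
--         Graph_Thingy can be a profile or a linear order.
--
--         [1,2,3] --> [(1,2), (2,3), (1,3)]
--         [[1,2,3], [2,3,1], [3,1,2]] --> [(1,2), (2,3), (3,1)]
--     """
--
--     if isinstance(Graph_Thingy[0], int): # in this case Graph_Thingy is (or should be) a linear order
--         return list(itertools.combinations(Graph_Thingy, 2)) # return just the individual edges, or comparisons, of this order
--     if isinstance(Graph_Thingy[0], tuple): # here it's assumed that Graph_Thingy is a set of tuples, in which case nothing needs to be done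
--         return sorted(Graph_Thingy)
--     elif isinstance(Graph_Thingy[0], list): # Graph_Thingy should now be a profile
--         result = []
--         for (a, b) in itertools.combinations(alternatives(Graph_Thingy), 2): # add the edges that enjoy majority support
--             if margin(Graph_Thingy, a, b) > 0:
--                 result.append((a, b))
--             if margin(Graph_Thingy, a, b) < 0:
--                 result.append((b, a))
--         return sorted(result)
-- ===== SOURCE B (Python) =====
-- import itertools
--
-- def SMG(Graph_Thingy):
--     if isinstance(Graph_Thingy[0], int):  # linear order: just its pairwise comparisons
--         return list(itertools.combinations(Graph_Thingy, 2))
--     if isinstance(Graph_Thingy[0], tuple):  # already a set of edges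
--         return sorted(Graph_Thingy)
--     elif isinstance(Graph_Thingy[0], list):  # profile: one pass over the ballots
--         alts = sorted(set(c for e in Graph_Thingy for c in e))
--         pairs = list(itertools.combinations(alts, 2))
--         margins = {p: 0 for p in pairs}
--         for l in Graph_Thingy:
--             for (a, b) in pairs:
--                 if l.index(a) < l.index(b):
--                     margins[(a, b)] += 1
--                 else:
--                     margins[(a, b)] -= 1
--         result = []
--         for (a, b) in pairs:
--             m = margins[(a, b)]
--             if m > 0:
--                 result.append((a, b))
--             elif m < 0:
--                 result.append((b, a))
--         return sorted(result)
-- ===== Notes on version B (the rewrite author's own statement) =====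
-- stated objective: alternative
-- what changed: In the profile branch B makes a single pass over the ballots accumulating a net-margin dictionary per pair (+1/-1 per ballot) and then emits each majority edge from one dictionary lookup, instead of A's per-pair recomputation of margin twice via four support() scans of the whole profile; it trades A's repeated scans for dictionary bookkeeping at the same asymptotic cost.
import Mathlib
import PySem

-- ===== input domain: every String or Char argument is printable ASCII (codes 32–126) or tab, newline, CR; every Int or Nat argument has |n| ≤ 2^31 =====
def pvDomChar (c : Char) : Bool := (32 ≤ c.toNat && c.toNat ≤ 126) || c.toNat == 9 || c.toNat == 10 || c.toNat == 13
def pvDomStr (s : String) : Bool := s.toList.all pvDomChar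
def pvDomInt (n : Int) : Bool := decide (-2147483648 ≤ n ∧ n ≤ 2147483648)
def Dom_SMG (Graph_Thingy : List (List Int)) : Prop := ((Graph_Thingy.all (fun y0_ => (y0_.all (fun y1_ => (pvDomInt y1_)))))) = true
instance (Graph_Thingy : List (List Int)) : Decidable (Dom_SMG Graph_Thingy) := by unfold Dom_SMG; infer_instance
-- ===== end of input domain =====

-- B replaces A's per-pair recomputation of margin (four support() scans per pair) by one pass
-- over the ballots that accumulates a net-margin dictionary per pair, then one lookup per pair.
-- The Lean signature fixes the argument to a profile (List (List Int)), so A's int/tuple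
-- branches are unreachable and only the profile (list) branch is ported.

-- itertools.combinations(xs, 2) as tuples, in CPython's order (shared primitive: both Pythons call it)
def comb2 {α : Type} : List α → List (α × α)
  | [] => []
  | x :: rest => rest.map (fun y => (x, y)) ++ comb2 rest

-- l.index(x) as an Int; total via getD 0 — exact wherever Python does not raise ValueError (Pre_SMG)
def pyIdx (l : List Int) (x : Int) : Int := ((PySem.List.index? l x).getD 0 : Nat)

-- ===== PORT A =====
-- alternatives(X) for a profile: sorted(list(set(c for e in X for c in e)))
def alternativesA (X : List (List Int)) : List Int :=
  PySem.List.sorted (PySem.Set.ofList (X.flatMap id)) (fun x => x) false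

-- support(Profile, x, y)
def supportA (P : List (List Int)) (x y : Int) : Int :=
  ((P.filter (fun l => decide (pyIdx l x - pyIdx l y < 0))).length : Int)

-- margin(Profile, x, y)
def marginA (P : List (List Int)) (x y : Int) : Int := supportA P x y - supportA P y x

def SMG (Graph_Thingy : List (List Int)) : List (Int × Int) :=
  -- profile branch of A: loop over combinations, two ifs, then sorted(result)
  let result := (comb2 (alternativesA Graph_Thingy)).foldl
    (fun acc p =>
      let acc := if marginA Graph_Thingy p.1 p.2 > 0 then acc ++ [(p.1, p.2)] else acc
      if marginA Graph_Thingy p.1 p.2 < 0 then acc ++ [(p.2, p.1)] else acc) []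
  PySem.List.sorted2 result Prod.fst Prod.snd false

-- ===== PORT B =====
def SMG_alt (Graph_Thingy : List (List Int)) : List (Int × Int) :=
  let alts := PySem.List.sorted (PySem.Set.ofList (Graph_Thingy.flatMap id)) (fun x => x) false
  let pairs := comb2 alts
  let margins0 : PySem.Dict (Int × Int) Int :=
    pairs.foldl (fun d p => d.insert p 0) PySem.Dict.empty
  let margins := Graph_Thingy.foldl
    (fun d l => pairs.foldl
      (fun d p =>
        if pyIdx l p.1 < pyIdx l p.2 then d.modify p 0 (fun m => m + 1)
        else d.modify p 0 (fun m => m - 1)) d) margins0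
  let result := pairs.foldl
    (fun acc p =>
      let m := margins.getD p 0   -- margins[(a,b)]: key always present, getD is exact
      if m > 0 then acc ++ [p]
      else if m < 0 then acc ++ [(p.2, p.1)]
      else acc) []
  PySem.List.sorted2 result Prod.fst Prod.snd false

-- ===== PRECONDITION & SPEC =====
-- Pre_ excludes exactly the inputs where Python A raises: the empty list (IndexError on
-- Graph_Thingy[0]) and profiles with at least two distinct alternatives where some ballot is
-- missing some alternative (ValueError from l.index).
def Pre_SMG (Graph_Thingy : List (List Int)) : Prop :=
  Graph_Thingy ≠ [] ∧
  ((∃ l ∈ Graph_Thingy, ∃ x ∈ l, ∃ l' ∈ Graph_Thingy, ∃ y ∈ l', x ≠ y) →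
    ∀ l ∈ Graph_Thingy, ∀ l' ∈ Graph_Thingy, ∀ x ∈ l', x ∈ l)
instance (Graph_Thingy : List (List Int)) : Decidable (Pre_SMG Graph_Thingy) := by
  unfold Pre_SMG; infer_instance

def pvWitness_SMG : List (List Int) := [[1, 2, 3], [2, 3, 1], [3, 1, 2]]

def Spec_SMG (Graph_Thingy : List (List Int)) (out : List (Int × Int)) : Prop := out = SMG_alt Graph_Thingy
instance (Graph_Thingy : List (List Int)) (out : List (Int × Int)) : Decidable (Spec_SMG Graph_Thingy out) := by unfold Spec_SMG; infer_instance

-- ===== CLAIM (what is proved, stated in full; the proofs are below) =====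
def Claim_equal_SMG : Prop := ∀ (Graph_Thingy : List (List Int)), Dom_SMG Graph_Thingy → Pre_SMG Graph_Thingy → Spec_SMG Graph_Thingy (SMG Graph_Thingy)

-- ===== LEMMAS AND PROOFS =====

-- per-ballot contribution of a pair to the net margin
def deltaB (l : List Int) (p : Int × Int) : Int :=
  if pyIdx l p.1 < pyIdx l p.2 then 1 else -1

-- membership facts for comb2 over a strictly increasing list
theorem mem_comb2 {α : Type} (xs : List α) (p : α × α) (hp : p ∈ comb2 xs) :
    p.1 ∈ xs ∧ p.2 ∈ xs := by
  induction xs with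
  | nil => simp [comb2] at hp
  | cons x rest ih =>
    simp only [comb2, List.mem_append, List.mem_map] at hp
    rcases hp with ⟨y, hy, rfl⟩ | h
    · exact ⟨by simp, by simp [hy]⟩
    · obtain ⟨h1, h2⟩ := ih h
      exact ⟨List.mem_cons_of_mem _ h1, List.mem_cons_of_mem _ h2⟩

theorem comb2_lt {α : Type} [Preorder α] (xs : List α)
    (hs : xs.Pairwise (· < ·)) (p : α × α) (hp : p ∈ comb2 xs) : p.1 < p.2 := by
  induction xs with
  | nil => simp [comb2] at hp
  | cons x rest ih =>
    simp only [comb2, List.mem_append, List.mem_map] at hp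
    rcases hp with ⟨y, hy, rfl⟩ | h
    · exact (List.pairwise_cons.mp hs).1 y hy
    · exact ih (List.pairwise_cons.mp hs).2 h

theorem comb2_nodup {α : Type} [LinearOrder α] (xs : List α)
    (hs : xs.Pairwise (· < ·)) : (comb2 xs).Nodup := by
  induction xs with
  | nil => simp [comb2]
  | cons x rest ih =>
    have hrest := (List.pairwise_cons.mp hs).2
    have hlt := (List.pairwise_cons.mp hs).1
    simp only [comb2]
    apply List.Nodup.append
    · exact List.Nodup.map (by intro a b h; simpa using h) (hrest.imp ne_of_lt)
    · exact ih hrest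
    · intro q hq1
      simp only [List.mem_map] at hq1
      obtain ⟨y, hy, rfl⟩ := hq1
      intro hq2
      have := (mem_comb2 rest (x, y) hq2).1
      exact absurd rfl (hlt x this).ne
theorem comb2_nil_of_short {α : Type} (xs : List α) (h : xs.length ≤ 1) : comb2 xs = [] := by
  match xs, h with
  | [], _ => rfl
  | [x], _ => rfl

-- the initial dictionary {p: 0 for p in pairs} reads 0 at every key
theorem getD_init_zero (qs : List (Int × Int)) (d : PySem.Dict (Int × Int) Int) (p : Int × Int)
    (h : d.getD p 0 = 0) : (qs.foldl (fun d p => d.insert p 0) d).getD p 0 = 0 := by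
  induction qs generalizing d with
  | nil => exact h
  | cons q rest ih =>
    apply ih
    by_cases hpq : p = q
    · subst hpq; exact PySem.Dict.getD_insert_self d p 0 0
    · rw [PySem.Dict.getD_insert_of_ne d 0 0 hpq]; exact h

-- one ballot's inner loop: keys not in qs are untouched
theorem getD_ballot_not_mem (l : List Int) (qs : List (Int × Int))
    (d : PySem.Dict (Int × Int) Int) (p : Int × Int) (hp : p ∉ qs) :
    (qs.foldl (fun d p =>
        if pyIdx l p.1 < pyIdx l p.2 then d.modify p 0 (fun m => m + 1)
        else d.modify p 0 (fun m => m - 1)) d).getD p 0 = d.getD p 0 := by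
  induction qs generalizing d with
  | nil => rfl
  | cons q rest ih =>
    have hne : p ≠ q := fun h => hp (h ▸ List.mem_cons_self)
    have hrest : p ∉ rest := fun h => hp (List.mem_cons_of_mem _ h)
    simp only [List.foldl_cons]
    rw [ih _ hrest]
    split <;> exact PySem.Dict.getD_modify_of_ne d 0 _ hne

-- one ballot's inner loop adds deltaB l p at each key p of qs
theorem getD_ballot (l : List Int) (qs : List (Int × Int))
    (d : PySem.Dict (Int × Int) Int) (p : Int × Int) (hq : qs.Nodup) (hp : p ∈ qs) :
    (qs.foldl (fun d p =>
        if pyIdx l p.1 < pyIdx l p.2 then d.modify p 0 (fun m => m + 1)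
        else d.modify p 0 (fun m => m - 1)) d).getD p 0 = d.getD p 0 + deltaB l p := by
  induction qs generalizing d with
  | nil => simp at hp
  | cons q rest ih =>
    simp only [List.foldl_cons]
    rcases List.mem_cons.mp hp with rfl | hmem
    · have hnr : p ∉ rest := (List.nodup_cons.mp hq).1
      rw [getD_ballot_not_mem l rest _ p hnr]
      unfold deltaB
      split <;> (rw [PySem.Dict.getD_modify_self]; try ring)
    · have hne : p ≠ q := fun h => (List.nodup_cons.mp hq).1 (h ▸ hmem)
      rw [ih _ (List.nodup_cons.mp hq).2 hmem]
      congr 1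
      split <;> exact PySem.Dict.getD_modify_of_ne d 0 _ hne

-- the whole one-pass loop accumulates the sum of per-ballot deltas
theorem getD_margins (G : List (List Int)) (qs : List (Int × Int))
    (d : PySem.Dict (Int × Int) Int) (p : Int × Int) (hq : qs.Nodup) (hp : p ∈ qs) :
    (G.foldl (fun d l => qs.foldl
        (fun d p =>
          if pyIdx l p.1 < pyIdx l p.2 then d.modify p 0 (fun m => m + 1)
          else d.modify p 0 (fun m => m - 1)) d) d).getD p 0
      = d.getD p 0 + (G.map (fun l => deltaB l p)).sum := by
  induction G generalizing d with
  | nil => simp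
  | cons l rest ih =>
    simp only [List.foldl_cons, List.map_cons, List.sum_cons]
    rw [ih _, getD_ballot l qs d p hq hp]
    ring

-- first occurrences of distinct present elements have distinct indices
theorem pyIdx_ne (l : List Int) (a b : Int) (ha : a ∈ l) (hb : b ∈ l) (hab : a ≠ b) :
    pyIdx l a ≠ pyIdx l b := by
  obtain ⟨ka, hka⟩ := Option.isSome_iff_exists.mp ((PySem.List.index?_isSome_iff l a).mpr ha)
  obtain ⟨kb, hkb⟩ := Option.isSome_iff_exists.mp ((PySem.List.index?_isSome_iff l b).mpr hb)
  obtain ⟨hlta, hga, -⟩ := PySem.List.getElem_of_index?_eq_some hka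
  obtain ⟨hltb, hgb, -⟩ := PySem.List.getElem_of_index?_eq_some hkb
  unfold pyIdx
  rw [hka, hkb]
  simp only [Option.getD_some, ne_eq, Int.natCast_inj]
  intro h
  subst h
  exact hab (hga ▸ hgb)

-- A's margin is the sum of per-ballot deltas (when every ballot ranks both alternatives)
theorem marginA_eq_sum (P : List (List Int)) (a b : Int)
    (h : ∀ l ∈ P, pyIdx l a ≠ pyIdx l b) :
    marginA P a b = (P.map (fun l => deltaB l (a, b))).sum := by
  induction P with
  | nil => simp [marginA, supportA]
  | cons l rest ih =>
    have hl := h l List.mem_cons_self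
    have ihr := ih (fun l' hl' => h l' (List.mem_cons_of_mem _ hl'))
    rw [List.map_cons, List.sum_cons, ← ihr]
    by_cases hab : pyIdx l a < pyIdx l b
    · have h1 : pyIdx l a - pyIdx l b < 0 := by omega
      have h2 : ¬ (pyIdx l b - pyIdx l a < 0) := by omega
      simp only [marginA, supportA, List.filter_cons, h1, h2, decide_true, decide_false,
        if_true, List.length_cons, deltaB, hab]
      push_cast
      ring
    · have h1 : ¬ (pyIdx l a - pyIdx l b < 0) := by omega
      have h2 : pyIdx l b - pyIdx l a < 0 := by omega
      simp only [marginA, supportA, List.filter_cons, h1, h2, decide_true, decide_false,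
        if_true, if_false, List.length_cons, deltaB, hab]
      push_cast
      ring

theorem SMG_spec : Claim_equal_SMG := by
  intro G hdom hpre
  show SMG G = SMG_alt G
  have halts_lt : (PySem.List.sorted (PySem.Set.ofList (G.flatMap id)) (fun x => x) false).Pairwise (· < ·) :=
    PySem.List.sorted_ofList_pairwise_lt (G.flatMap id)
  set alts := PySem.List.sorted (PySem.Set.ofList (G.flatMap id)) (fun x => x) false with halts
  have hmem_alts : ∀ x ∈ alts, ∃ l ∈ G, x ∈ l := by
    intro x hx
    rw [halts, PySem.List.mem_sorted, PySem.Set.mem_ofList] at hx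
    simpa using hx
  by_cases hex : ∃ l ∈ G, ∃ x ∈ l, ∃ l' ∈ G, ∃ y ∈ l', x ≠ y
  · have hall := hpre.2 hex
    have hpairs_nd : (comb2 alts).Nodup := comb2_nodup alts halts_lt
    -- each pair's dictionary entry equals A's margin
    have hkey : ∀ p ∈ comb2 alts,
        ((G.foldl (fun d l => (comb2 alts).foldl
            (fun d p =>
              if pyIdx l p.1 < pyIdx l p.2 then d.modify p 0 (fun m => m + 1)
              else d.modify p 0 (fun m => m - 1)) d)
          ((comb2 alts).foldl (fun d p => d.insert p 0) PySem.Dict.empty)).getD p 0)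
          = marginA G p.1 p.2 := by
      intro p hp
      have hlt := comb2_lt alts halts_lt p hp
      obtain ⟨h1, h2⟩ := mem_comb2 alts p hp
      have hne : ∀ l ∈ G, pyIdx l p.1 ≠ pyIdx l p.2 := by
        intro l hl
        obtain ⟨l1, hl1, hx1⟩ := hmem_alts p.1 h1
        obtain ⟨l2, hl2, hx2⟩ := hmem_alts p.2 h2
        exact pyIdx_ne l p.1 p.2 (hall l hl l1 hl1 p.1 hx1) (hall l hl l2 hl2 p.2 hx2) hlt.ne
      rw [getD_margins G (comb2 alts) _ p hpairs_nd hp,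
        getD_init_zero (comb2 alts) PySem.Dict.empty p rfl,
        marginA_eq_sum G p.1 p.2 hne]
      ring
    simp only [SMG, SMG_alt, alternativesA]
    rw [← halts]
    congr 1
    apply PySem.List.foldl_congr_mem
    intro acc p hp
    rw [hkey p hp]
    rcases lt_trichotomy (marginA G p.1 p.2) 0 with h | h | h
    · simp [h, not_lt.mpr h.le]
    · simp [h]
    · simp [h, not_lt.mpr h.le]
  · have hshort : alts.length ≤ 1 := by
      by_contra hlong
      apply hex
      obtain ⟨x, y, t, halts2⟩ : ∃ x y t, alts = x :: y :: t := by
        cases halts3 : alts with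
        | nil => rw [halts3] at hlong; simp at hlong
        | cons a s => cases s with
          | nil => rw [halts3] at hlong; simp at hlong
          | cons b t => exact ⟨a, b, t, rfl⟩
      have hx : x ∈ alts := by rw [halts2]; simp
      have hy : y ∈ alts := by rw [halts2]; simp
      have hxy : x ≠ y := by
        have h2 := halts_lt
        rw [halts2] at h2
        exact ((List.pairwise_cons.mp h2).1 y (by simp)).ne
      obtain ⟨l1, hl1, hx1⟩ := hmem_alts x hx
      obtain ⟨l2, hl2, hx2⟩ := hmem_alts y hy
      exact ⟨l1, hl1, x, hx1, l2, hl2, y, hx2, hxy⟩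
    have hnil : comb2 alts = [] := comb2_nil_of_short alts hshort
    simp only [SMG, SMG_alt, alternativesA]
    rw [← halts, hnil]
    rfl
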